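-- pv_equiv track=rewrite | github.com/ferhatelmas/algo | topCoder/srms/400s/srm463/div2/bunny_puzzle.py | theCount
-- ===== SOURCE A (Python) =====
-- def theCount(bunnies):
--     c = 0
--     for i in bunnies:
--         for j in bunnies:
--             if i != j:
--                 m, n = sorted([i, 2 * j - i])
--                 c += not sum(m <= b <= n for b in bunnies if b != i and b != j)
--     return c
-- ===== SOURCE B (Python) =====
-- def _bisect_left(s, x):
--     lo, hi = 0, len(s)
--     while lo < hi:
--         mid = (lo + hi) // 2
--         if s[mid] < x:
--             lo = mid + 1
--         else:
--             hi = mid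
--     return lo
--
--
-- def _bisect_right(s, x):
--     lo, hi = 0, len(s)
--     while lo < hi:
--         mid = (lo + hi) // 2
--         if x < s[mid]:
--             hi = mid
--         else:
--             lo = mid + 1
--     return lo
--
--
-- def theCount(bunnies):
--     s = sorted(bunnies)
--     cnt = {}
--     for b in bunnies:
--         cnt[b] = cnt.get(b, 0) + 1
--     c = 0
--     for i in bunnies:
--         for j in bunnies:
--             if i != j:
--                 r = 2 * j - i
--                 lo, hi = (i, r) if i <= r else (r, i)
--                 # bunnies inside [lo, hi] other than the values i and j
--                 # (i and j both lie in [lo, hi], so subtracting their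
--                 # multiplicities removes exactly them)
--                 if _bisect_right(s, hi) - _bisect_left(s, lo) == cnt[i] + cnt[j]:
--                     c += 1
--     return c
-- ===== Notes on version B (the rewrite author's own statement) =====
-- stated objective: faster
-- what changed: Replaced A's O(n) linear scan of all bunnies per ordered pair by a one-time sort plus occurrence counter: per pair, two binary searches count the bunnies in the reflection interval and the multiplicities of the two endpoint values are subtracted.
import Mathlib
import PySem

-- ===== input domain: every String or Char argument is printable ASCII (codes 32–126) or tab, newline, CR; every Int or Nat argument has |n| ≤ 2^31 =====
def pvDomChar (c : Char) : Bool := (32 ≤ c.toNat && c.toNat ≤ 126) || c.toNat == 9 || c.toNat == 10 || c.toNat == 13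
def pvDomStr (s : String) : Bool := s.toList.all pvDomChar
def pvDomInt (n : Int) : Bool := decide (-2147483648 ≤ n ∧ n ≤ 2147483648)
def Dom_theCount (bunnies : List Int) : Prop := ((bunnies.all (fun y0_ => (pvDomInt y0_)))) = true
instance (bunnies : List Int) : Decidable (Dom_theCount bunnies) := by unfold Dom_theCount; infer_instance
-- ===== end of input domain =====

-- B replaces A's linear scan of all bunnies per ordered pair by a one-time sort plus a
-- multiplicity counter: per pair, two binary searches count the bunnies in the reflection
-- interval, and the multiplicities of the two endpoint values are subtracted (objective: faster).

-- ===== PORT A =====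
def theCount (bunnies : List Int) : Int :=
  bunnies.foldl (fun c i =>
    bunnies.foldl (fun c j =>
      if i ≠ j then
        -- m, n = sorted([i, 2*j - i])  (the sorted list has length 2, so both indices are in range)
        let mn := PySem.List.sorted [i, 2 * j - i] id
        let m := mn.getD 0 0
        let n := mn.getD 1 0
        -- sum(m <= b <= n for b in bunnies if b != i and b != j)
        let s := ((bunnies.filter (fun b => !(b == i) && !(b == j))).map
                    (fun b => if m ≤ b ∧ b ≤ n then (1 : Int) else 0)).sum
        -- c += not s  (`not 0` is True, counted as 1; `not k` for k ≠ 0 is False, counted as 0)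
        c + (if s = 0 then 1 else 0)
      else c) c) 0

-- ===== PORT B =====
def theCount_alt (bunnies : List Int) : Int :=
  let s := PySem.List.sorted bunnies id
  -- the `cnt[b] = cnt.get(b, 0) + 1` counter loop
  let cnt := bunnies.foldl (fun d x => d.modify x 0 (fun v => v + 1)) (PySem.Dict.empty : PySem.Dict Int Int)
  bunnies.foldl (fun c i =>
    bunnies.foldl (fun c j =>
      if i ≠ j then
        let r := 2 * j - i
        let lo := if i ≤ r then i else r
        let hi := if i ≤ r then r else i
        -- _bisect_right/_bisect_left are the textbook binary searches, i.e. exactly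
        -- PySem.List.bisectRight/bisectLeft; cnt[i] cannot raise since i ∈ bunnies, so getD is exact
        if ((PySem.List.bisectRight s hi : Int) - (PySem.List.bisectLeft s lo : Int)
              = cnt.getD i 0 + cnt.getD j 0) then c + 1 else c
      else c) c) 0

-- ===== PRECONDITION & SPEC =====
def Spec_theCount (bunnies : List Int) (out : Int) : Prop := out = theCount_alt bunnies
instance (bunnies : List Int) (out : Int) : Decidable (Spec_theCount bunnies out) := by unfold Spec_theCount; infer_instance

-- ===== CLAIM (what is proved, stated in full; the proofs are below) =====
def Claim_equal_theCount : Prop := ∀ (bunnies : List Int), Dom_theCount bunnies → Spec_theCount bunnies (theCount bunnies)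

-- ===== LEMMAS AND PROOFS =====

-- sorted of a two-element list is [min, max]
lemma sorted_pair (a b : Int) :
    (PySem.List.sorted [a, b] id).getD 0 0 = min a b ∧ (PySem.List.sorted [a, b] id).getD 1 0 = max a b := by
  have hperm := PySem.List.sorted_perm [a, b] (id : Int → Int) false
  have hlen : (PySem.List.sorted [a, b] (id : Int → Int)).length = 2 := by
    simp [hperm.length_eq]
  obtain ⟨c, d, hcd⟩ := List.length_eq_two.mp hlen
  have hsort := PySem.List.sorted_pairwise [a, b] (id : Int → Int)
  rw [hcd] at hperm hsort ⊢
  have hc : c ∈ [a, b] := hperm.mem_iff.mp (by simp)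
  have hd : d ∈ [a, b] := hperm.mem_iff.mp (by simp)
  have ha : a ∈ [c, d] := hperm.mem_iff.mpr (by simp)
  have hb : b ∈ [c, d] := hperm.mem_iff.mpr (by simp)
  have hle : c ≤ d := by
    simp only [List.pairwise_cons, List.mem_singleton, id] at hsort
    exact hsort.1 d rfl
  simp only [List.mem_cons, List.not_mem_nil, or_false] at hc hd ha hb
  constructor <;> simp only [List.getD] <;> simp <;> omega

-- a countP equals k when exactly the first k positions satisfy p
lemma countP_eq_of_prefix (p : Int → Bool) (s : List Int) (k : Nat) (hk : k ≤ s.length)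
    (h1 : ∀ (j : Nat) (hj : j < s.length), j < k → p s[j])
    (h2 : ∀ (j : Nat) (hj : j < s.length), k ≤ j → ¬ p s[j]) :
    s.countP p = k := by
  induction s generalizing k with
  | nil => simp at hk; simp [hk]
  | cons a t ih =>
    cases k with
    | zero =>
      rw [List.countP_eq_zero.mpr]
      intro x hx
      obtain ⟨m, hm, rfl⟩ := List.mem_iff_getElem.mp hx
      exact h2 m hm (Nat.zero_le _)
    | succ k =>
      have hpa : p a := h1 0 (by simp) (Nat.succ_pos _)
      rw [List.countP_cons_of_pos hpa, ih k (by simpa using hk)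
        (fun m hm hlt => by simpa using h1 (m + 1) (by simpa using Nat.succ_lt_succ hm) (by omega))
        (fun m hm hge => by simpa using h2 (m + 1) (by simpa using Nat.succ_lt_succ hm) (by omega))]

-- bisectLeft on a sorted list counts the elements < x
lemma bisectLeft_count (s : List Int) (x : Int) (hs : List.Pairwise (fun a b => a ≤ b) s) :
    PySem.List.bisectLeft s x = s.countP (fun b => decide (b < x)) := by
  obtain ⟨hle, h1, h2⟩ := PySem.List.bisectLeft_spec s x hs
  exact (countP_eq_of_prefix _ s _ hle (fun m hm hlt => by simpa using h1 m hm hlt)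
    (fun m hm hge => by simpa using not_lt.mpr (h2 m hm hge))).symm

-- bisectRight on a sorted list counts the elements ≤ x
lemma bisectRight_count (s : List Int) (x : Int) (hs : List.Pairwise (fun a b => a ≤ b) s) :
    PySem.List.bisectRight s x = s.countP (fun b => decide (b ≤ x)) := by
  obtain ⟨hle, h1, h2⟩ := PySem.List.bisectRight_spec s x hs
  exact (countP_eq_of_prefix _ s _ hle (fun m hm hlt => by simpa using h1 m hm hlt)
    (fun m hm hge => by simpa using not_le.mpr (h2 m hm hge))).symm

-- the elements of [lo, hi] split into those distinct from i and j plus the copies of i and of j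
lemma count_split (l : List Int) (i j lo hi : Int) (hij : i ≠ j)
    (h1 : lo ≤ i) (h2 : i ≤ hi) (h3 : lo ≤ j) (h4 : j ≤ hi) :
    l.countP (fun b => decide (lo ≤ b ∧ b ≤ hi)) =
      l.countP (fun b => decide (lo ≤ b ∧ b ≤ hi) && (!(b == i) && !(b == j)))
        + l.count i + l.count j := by
  induction l with
  | nil => simp
  | cons a t ih =>
    simp only [List.countP_cons, List.count_cons]
    by_cases hai : a = i <;> by_cases haj : a = j <;>
      simp_all <;> omega

-- counting everything ≤ hi = counting < lo plus counting inside [lo, hi]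
lemma count_le_split (l : List Int) (lo hi : Int) (h : lo ≤ hi) :
    l.countP (fun b => decide (b ≤ hi)) =
      l.countP (fun b => decide (b < lo)) + l.countP (fun b => decide (lo ≤ b ∧ b ≤ hi)) := by
  induction l with
  | nil => simp
  | cons a t ih =>
    simp only [List.countP_cons]
    rcases lt_or_ge a lo with ha | ha <;> rcases le_or_gt a hi with hb | hb
    · simp [ih, ha, hb, not_le.mpr ha]; omega
    · exact absurd (ha.trans_le h) (not_lt.mpr hb.le)
    · simp [ih, ha, hb, not_lt.mpr ha]; omega
    · simp [ih, not_lt.mpr ha, not_le.mpr hb]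

-- the per-pair bodies agree: A's inner scan finds nothing iff B's bisect/counter arithmetic gives 0
lemma pair_key (bunnies : List Int) (i j : Int) (hij : i ≠ j) :
    ((((bunnies.filter (fun b => !(b == i) && !(b == j))).map
        (fun b => if (PySem.List.sorted [i, 2 * j - i] id).getD 0 0 ≤ b ∧
                    b ≤ (PySem.List.sorted [i, 2 * j - i] id).getD 1 0 then (1 : Int) else 0)).sum = 0)
      ↔ ((PySem.List.bisectRight (PySem.List.sorted bunnies id)
              (if i ≤ 2 * j - i then 2 * j - i else i) : Int)
          - (PySem.List.bisectLeft (PySem.List.sorted bunnies id)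
              (if i ≤ 2 * j - i then i else 2 * j - i) : Int)
          = (bunnies.foldl (fun d x => d.modify x 0 (fun v => v + 1))
              (PySem.Dict.empty : PySem.Dict Int Int)).getD i 0
            + (bunnies.foldl (fun d x => d.modify x 0 (fun v => v + 1))
                (PySem.Dict.empty : PySem.Dict Int Int)).getD j 0)) := by
  set r := 2 * j - i with hr
  obtain ⟨hm, hn⟩ := sorted_pair i r
  rw [hm, hn]
  have hlo : (if i ≤ r then i else r) = min i r := (min_def i r).symm
  have hhi : (if i ≤ r then r else i) = max i r := (max_def i r).symm
  rw [hlo, hhi]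
  set lo := min i r
  set hi := max i r
  have hloi : lo ≤ i := min_le_left _ _
  have hihi : i ≤ hi := le_max_left _ _
  have hloj : lo ≤ j := by simp only [lo, hr]; omega
  have hjhi : j ≤ hi := by simp only [hi, hr]; omega
  have hlohi : lo ≤ hi := min_le_of_left_le hihi
  -- A's side: the 0/1-sum is a countP over bunnies
  have hAfun : (fun b : Int => if lo ≤ b ∧ b ≤ hi then (1 : Int) else 0)
      = (fun b : Int => if (fun b : Int => decide (lo ≤ b ∧ b ≤ hi)) b = true then (1 : Int) else 0) := by
    funext b; simp
  rw [hAfun, PySem.List.sum_map_ite_one_zero, List.countP_filter]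
  -- B's side: bisect counts, transported from the sorted list to bunnies
  have hsorted := PySem.List.sorted_pairwise bunnies (id : Int → Int)
  simp only [id] at hsorted
  have hperm := PySem.List.sorted_perm bunnies (id : Int → Int) false
  rw [bisectRight_count _ _ hsorted, bisectLeft_count _ _ hsorted,
    hperm.countP_eq, hperm.countP_eq]
  -- the counter dict is exact multiplicity
  have hcnt : ∀ v : Int,
      (bunnies.foldl (fun d x => d.modify x 0 (fun v => v + 1))
        (PySem.Dict.empty : PySem.Dict Int Int)).getD v 0 = (bunnies.count v : Int) := by
    intro v
    rw [PySem.Dict.getD_foldl_modify_add_one]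
    simp [PySem.Dict.getD, PySem.Dict.get?, PySem.Dict.empty]
  rw [hcnt i, hcnt j]
  -- arithmetic over the four counts
  have hsplit := count_split bunnies i j lo hi hij hloi hihi hloj hjhi
  have hle := count_le_split bunnies lo hi hlohi
  constructor
  · intro h
    have h0 : (bunnies.countP fun b => decide (lo ≤ b ∧ b ≤ hi) && (!(b == i) && !(b == j))) = 0 := by
      exact_mod_cast h
    omega
  · intro h
    have h0 : (bunnies.countP fun b => decide (lo ≤ b ∧ b ≤ hi) && (!(b == i) && !(b == j))) = 0 := by
      omega
    exact_mod_cast h0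

lemma main_eq (bunnies : List Int) : theCount bunnies = theCount_alt bunnies := by
  simp only [theCount, theCount_alt]
  refine PySem.List.foldl_congr_mem _ _ _ _ ?_
  intro c i hi
  refine PySem.List.foldl_congr_mem _ _ _ _ ?_
  intro c' j hj
  by_cases hij : i = j
  · simp [hij]
  · simp only [ne_eq, hij, not_false_iff, if_true]
    rcases (pair_key bunnies i j hij) with ⟨h1, h2⟩
    by_cases hA : (((bunnies.filter (fun b => !(b == i) && !(b == j))).map
        (fun b => if (PySem.List.sorted [i, 2 * j - i] id).getD 0 0 ≤ b ∧
                    b ≤ (PySem.List.sorted [i, 2 * j - i] id).getD 1 0 then (1 : Int) else 0)).sum = 0)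
    · rw [if_pos hA, if_pos (h1 hA)]
    · rw [if_neg hA, if_neg (fun hB => hA (h2 hB))]
      ring

-- ===== VERDICT (by name: the statement is the Claim_ definition above) =====
theorem theCount_spec : Claim_equal_theCount := by
  intro bunnies _
  exact main_eq bunnies
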